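-- pv_equiv track=rewrite | github.com/dsaban/warl0k_dash_app_ai_server | app/9_streamlit_multiAttacks_warlok.py | infer_attack_labels
-- ===== SOURCE A (Python) =====
-- from typing import Dict, Any, List, Tuple, Optional, Set
--
-- ATK_LABELS  = ["none","reorder","drop","replay","timewarp","splice"]
--
-- FIELD_TO_ATKS: Dict[str, List[str]] = {
--     "dt_ms":          ["timewarp"],
--     "op_code":        ["splice"],
--     "step_idx":       ["reorder"],
--     "global_counter": ["replay"],
--     "window_id":      ["reorder"],
--     "os_meas":        ["splice"],
--     "session_id":     ["replay"],
-- }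
--
-- def infer_attack_labels(edits: List[Dict], named_attacks: List[str]) -> List[int]:
--     """
--     Return a multi-hot label vector (list of active class indices).
--     Combines named attack modes + inferences from manual edits.
--     """
--     active: Set[str] = set()
--     for a in named_attacks:
--         if a != "none":
--             active.add(a)
--     for e in edits:
--         for lbl in FIELD_TO_ATKS.get(str(e.get("field","")), []):
--             active.add(lbl)
--     if not active:
--         active.add("none")
--     return sorted([ATK_LABELS.index(a) for a in active if a in ATK_LABELS])
-- ===== SOURCE B (Python) =====
-- ATK_LABELS  = ["none","reorder","drop","replay","timewarp","splice"]
--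
-- FIELD_TO_ATKS = {
--     "dt_ms":          ["timewarp"],
--     "op_code":        ["splice"],
--     "step_idx":       ["reorder"],
--     "global_counter": ["replay"],
--     "window_id":      ["reorder"],
--     "os_meas":        ["splice"],
--     "session_id":     ["replay"],
-- }
--
-- def infer_attack_labels(edits, named_attacks):
--     """Label-driven: enumerate the fixed label vocabulary once and test each
--     label against the inputs, instead of accumulating a set from the inputs
--     and sorting its indices afterwards."""
--     edit_labels = [lbl for e in edits
--                    for lbl in FIELD_TO_ATKS.get(str(e.get("field", "")), [])]
--     if not edit_labels and all(a == "none" for a in named_attacks):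
--         return [0]
--     return [i for i, lbl in enumerate(ATK_LABELS)
--             if (lbl != "none" and lbl in named_attacks) or lbl in edit_labels]
-- ===== Notes on version B (the rewrite author's own statement) =====
-- stated objective: alternative
-- what changed: Inverts the traversal: instead of scanning the inputs to accumulate a string set and then filtering/indexing/sorting it, B enumerates the fixed label vocabulary ATK_LABELS once and emits each index whose label is found active in named_attacks or in the labels inferred from the edits, with one emptiness test for the 'none' fallback; the output is produced in index order so no set and no sort exist.
import Mathlib
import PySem

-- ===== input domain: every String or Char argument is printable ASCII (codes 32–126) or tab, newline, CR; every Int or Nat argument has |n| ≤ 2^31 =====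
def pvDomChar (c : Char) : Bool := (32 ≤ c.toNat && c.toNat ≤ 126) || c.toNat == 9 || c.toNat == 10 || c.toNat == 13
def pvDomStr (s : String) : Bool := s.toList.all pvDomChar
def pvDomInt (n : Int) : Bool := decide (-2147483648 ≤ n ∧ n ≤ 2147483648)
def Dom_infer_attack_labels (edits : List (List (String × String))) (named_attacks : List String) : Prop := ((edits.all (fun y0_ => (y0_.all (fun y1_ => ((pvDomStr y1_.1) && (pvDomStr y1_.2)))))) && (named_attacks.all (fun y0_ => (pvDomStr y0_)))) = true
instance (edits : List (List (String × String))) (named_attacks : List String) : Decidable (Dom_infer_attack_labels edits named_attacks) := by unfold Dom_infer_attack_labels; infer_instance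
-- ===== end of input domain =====

-- B inverts the traversal: it enumerates the fixed label vocabulary and tests each label
-- against the inputs, instead of A's input-driven set accumulation plus filter/index/sort
-- (objective: alternative).

-- shared module constants of the Python file
def ATK_LABELS : List String := ["none","reorder","drop","replay","timewarp","splice"]

def FIELD_TO_ATKS : PySem.Dict String (List String) := PySem.Dict.mk
  [("dt_ms",["timewarp"]), ("op_code",["splice"]), ("step_idx",["reorder"]),
   ("global_counter",["replay"]), ("window_id",["reorder"]), ("os_meas",["splice"]),
   ("session_id",["replay"])]

-- FIELD_TO_ATKS.get(str(e.get("field","")), []) — both programs' shared lookup expression;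
-- str() of a string is the identity (values are strings under the type convention)
def fieldLabels (e : List (String × String)) : List String :=
  PySem.Dict.getD FIELD_TO_ATKS (PySem.Dict.getD (PySem.Dict.mk e) "field" "") []

-- ===== PORT A =====
def infer_attack_labels (edits : List (List (String × String))) (named_attacks : List String) : List Int :=
  let active : PySem.Set String :=
    named_attacks.foldl (fun s a => if a ≠ "none" then PySem.Set.add s a else s) PySem.Set.empty
  let active :=
    edits.foldl (fun s e => (fieldLabels e).foldl (fun s lbl => PySem.Set.add s lbl) s) active
  let active := if active.isEmpty then PySem.Set.add active "none" else active
  -- sorted([ATK_LABELS.index(a) for a in active if a in ATK_LABELS]); the sort makes the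
  -- result independent of the set's iteration order (indices are distinct)
  PySem.List.sorted
    ((active.filter (fun a => ATK_LABELS.contains a)).map
      (fun a => (((PySem.List.index? ATK_LABELS a).getD 0 : Nat) : Int)))
    (fun x => x) false

-- ===== PORT B =====
def infer_attack_labels_alt (edits : List (List (String × String))) (named_attacks : List String) : List Int :=
  -- edit_labels = [lbl for e in edits for lbl in FIELD_TO_ATKS.get(str(e.get("field","")), [])]
  let edit_labels : List String := edits.flatMap (fun e => fieldLabels e)
  if edit_labels.isEmpty && named_attacks.all (fun a => a == "none") then [0]
  else
    -- [i for i, lbl in enumerate(ATK_LABELS) if (lbl != "none" and lbl in named_attacks) or lbl in edit_labels]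
    ((PySem.List.enumerate ATK_LABELS 0).filter
        (fun p => (p.2 != "none" && named_attacks.contains p.2) || edit_labels.contains p.2)).map
      (fun p => p.1)

-- ===== PRECONDITION & SPEC =====
def Spec_infer_attack_labels (edits : List (List (String × String))) (named_attacks : List String) (out : List Int) : Prop := out = infer_attack_labels_alt edits named_attacks
instance (edits : List (List (String × String))) (named_attacks : List String) (out : List Int) : Decidable (Spec_infer_attack_labels edits named_attacks out) := by unfold Spec_infer_attack_labels; infer_instance

-- ===== CLAIM (what is proved, stated in full; the proofs are below) =====
def Claim_equal_infer_attack_labels : Prop := ∀ (edits : List (List (String × String))) (named_attacks : List String), Dom_infer_attack_labels edits named_attacks → Spec_infer_attack_labels edits named_attacks (infer_attack_labels edits named_attacks)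

-- ===== LEMMAS AND PROOFS =====
def albIdx (a : String) : Nat := (PySem.List.index? ATK_LABELS a).getD 0

lemma albIdx_lt {a : String} (h : a ∈ ATK_LABELS) : albIdx a < 6 := by
  obtain ⟨k, hk⟩ := Option.isSome_iff_exists.mp ((PySem.List.index?_isSome_iff ATK_LABELS a).mpr h)
  obtain ⟨hlt, -, -⟩ := PySem.List.getElem_of_index?_eq_some hk
  have hia : albIdx a = k := by simp only [albIdx, hk, Option.getD_some]
  rw [hia]; simpa [ATK_LABELS] using hlt

lemma albIdx_inj {a b : String} (ha : a ∈ ATK_LABELS) (hb : b ∈ ATK_LABELS)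
    (h : albIdx a = albIdx b) : a = b := by
  obtain ⟨k, hk⟩ := Option.isSome_iff_exists.mp ((PySem.List.index?_isSome_iff ATK_LABELS a).mpr ha)
  obtain ⟨k', hk'⟩ := Option.isSome_iff_exists.mp ((PySem.List.index?_isSome_iff ATK_LABELS b).mpr hb)
  obtain ⟨hlt, hget, -⟩ := PySem.List.getElem_of_index?_eq_some hk
  obtain ⟨hlt', hget', -⟩ := PySem.List.getElem_of_index?_eq_some hk'
  have : k = k' := by simp only [albIdx, hk, hk', Option.getD_some] at h; exact h
  subst this; rw [← hget, ← hget']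

lemma albIdx_getElem (a : String) (h : a ∈ ATK_LABELS) (hlt : albIdx a < ATK_LABELS.length) :
    ATK_LABELS[albIdx a] = a := by
  obtain ⟨k, hk⟩ := Option.isSome_iff_exists.mp ((PySem.List.index?_isSome_iff ATK_LABELS a).mpr h)
  obtain ⟨hklt, hget, -⟩ := PySem.List.getElem_of_index?_eq_some hk
  have hia : albIdx a = k := by simp only [albIdx, hk, Option.getD_some]
  simp only [hia] at hlt ⊢
  exact hget

lemma albIdx_of_getElem (k : Nat) (h : k < 6) :
    albIdx (ATK_LABELS.getD k "") = k := by
  interval_cases k <;> decide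

lemma mem_foldlNamed (l : List String) (s : PySem.Set String) (x : String) :
    x ∈ l.foldl (fun s a => if a ≠ "none" then PySem.Set.add s a else s) s ↔
      x ∈ s ∨ (x ∈ l ∧ x ≠ "none") := by
  induction l generalizing s with
  | nil => simp
  | cons a t ih =>
    simp only [List.foldl_cons, ih]
    by_cases h : a = "none"
    · simp [h]; tauto
    · simp [h, PySem.Set.mem_add]
      constructor
      · rintro (((hx|rfl)|⟨hx,hne⟩)) <;> tauto
      · rintro (hx | ⟨(rfl|hx), hne⟩) <;> tauto

lemma nodup_foldlNamed (l : List String) (s : PySem.Set String) (h : s.Nodup) :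
    (l.foldl (fun s a => if a ≠ "none" then PySem.Set.add s a else s) s).Nodup := by
  induction l generalizing s with
  | nil => exact h
  | cons a t ih =>
    simp only [List.foldl_cons]
    split
    · exact ih _ (PySem.Set.nodup_add _ _ h)
    · exact ih _ h

lemma nodup_foldlAdd (l : List String) (s : PySem.Set String) (h : s.Nodup) :
    (l.foldl (fun s b => PySem.Set.add s b) s).Nodup := by
  induction l generalizing s with
  | nil => exact h
  | cons a t ih => exact ih _ (PySem.Set.nodup_add _ _ h)

lemma mem_foldlEdits (l : List (List (String × String))) (s : PySem.Set String) (x : String) :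
    x ∈ l.foldl (fun s e => (fieldLabels e).foldl (fun s lbl => PySem.Set.add s lbl) s) s ↔
      x ∈ s ∨ ∃ e ∈ l, x ∈ fieldLabels e := by
  induction l generalizing s with
  | nil => simp
  | cons e t ih =>
    simp only [List.foldl_cons, ih, PySem.Set.mem_foldl_add (f := fun b => b), List.mem_cons]
    constructor
    · rintro ((hx | ⟨b, hb, rfl⟩) | ⟨e', he', hx⟩)
      · exact Or.inl hx
      · exact Or.inr ⟨e, Or.inl rfl, hb⟩
      · exact Or.inr ⟨e', Or.inr he', hx⟩
    · rintro (hx | ⟨e', (rfl|he'), hx⟩)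
      · exact Or.inl (Or.inl hx)
      · exact Or.inl (Or.inr ⟨x, hx, rfl⟩)
      · exact Or.inr ⟨e', he', hx⟩

lemma nodup_foldlEdits (l : List (List (String × String))) (s : PySem.Set String) (h : s.Nodup) :
    (l.foldl (fun s e => (fieldLabels e).foldl (fun s lbl => PySem.Set.add s lbl) s) s).Nodup := by
  induction l generalizing s with
  | nil => exact h
  | cons e t ih => exact ih _ (nodup_foldlAdd _ _ h)

-- B's enumerate-filter-map: strictly increasing, membership characterised by the predicate
lemma enumFilterMap (P : String → Bool) :
    ((((PySem.List.enumerate ATK_LABELS 0).filter (fun p => P p.2)).map (fun p => p.1)).Pairwise (· < ·)) ∧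
    ∀ i : Int, (i ∈ (((PySem.List.enumerate ATK_LABELS 0).filter (fun p => P p.2)).map (fun p => p.1)) ↔
      ∃ k : Nat, ∃ h : k < ATK_LABELS.length, i = (k : Int) ∧ P ATK_LABELS[k]) := by
  constructor
  · exact (List.Pairwise.sublist List.filter_sublist
      (PySem.List.pairwise_lt_enumerate ATK_LABELS 0)).map _ (fun {p q} h => h)
  · intro i
    simp only [List.mem_map, List.mem_filter, PySem.List.mem_enumerate_iff]
    constructor
    · rintro ⟨p, ⟨⟨k, hk, rfl⟩, hP⟩, rfl⟩
      exact ⟨k, hk, by simp, hP⟩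
    · rintro ⟨k, hk, rfl, hP⟩
      exact ⟨((k : Int), ATK_LABELS[k]), ⟨⟨k, hk, by simp⟩, hP⟩, rfl⟩

theorem main_eq (edits : List (List (String × String))) (named_attacks : List String) :
    infer_attack_labels edits named_attacks = infer_attack_labels_alt edits named_attacks := by
  simp only [infer_attack_labels, infer_attack_labels_alt]
  -- A's accumulated set: membership and nodup
  have hA2mem : ∀ x, x ∈ edits.foldl (fun s e => (fieldLabels e).foldl
        (fun s lbl => PySem.Set.add s lbl) s)
        (named_attacks.foldl (fun s a => if a ≠ "none" then PySem.Set.add s a else s)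
          (PySem.Set.empty : PySem.Set String)) ↔
      (x ∈ named_attacks ∧ x ≠ "none") ∨ ∃ e ∈ edits, x ∈ fieldLabels e := by
    intro x
    rw [mem_foldlEdits, mem_foldlNamed]
    simp [PySem.Set.empty]
  have hA2nodup : (edits.foldl (fun s e => (fieldLabels e).foldl
        (fun s lbl => PySem.Set.add s lbl) s)
        (named_attacks.foldl (fun s a => if a ≠ "none" then PySem.Set.add s a else s)
          (PySem.Set.empty : PySem.Set String))).Nodup :=
    nodup_foldlEdits _ _ (nodup_foldlNamed _ _ List.nodup_nil)
  generalize hA2 : edits.foldl (fun s e => (fieldLabels e).foldl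
        (fun s lbl => PySem.Set.add s lbl) s)
        (named_attacks.foldl (fun s a => if a ≠ "none" then PySem.Set.add s a else s)
          (PySem.Set.empty : PySem.Set String)) = A2 at *
  -- B's flattened edit labels
  have hEL : ∀ x, x ∈ edits.flatMap (fun e => fieldLabels e) ↔ ∃ e ∈ edits, x ∈ fieldLabels e := by
    intro x; simp [List.mem_flatMap]
  -- B's fallback condition holds iff A's set is empty
  have hcond : ((edits.flatMap (fun e => fieldLabels e)).isEmpty
      && named_attacks.all (fun a => a == "none")) = true ↔ A2 = [] := by
    simp only [Bool.and_eq_true, List.isEmpty_iff, List.all_eq_true, beq_iff_eq,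
      List.eq_nil_iff_forall_not_mem]
    constructor
    · rintro ⟨hnil, hall⟩ x hx
      rcases (hA2mem x).mp hx with ⟨hn, hne⟩ | ⟨e, he, hb⟩
      · exact hne (hall x hn)
      · exact hnil x ((hEL x).mpr ⟨e, he, hb⟩)
    · intro hmem
      refine ⟨fun x hx => hmem x ((hA2mem x).mpr (Or.inr ((hEL x).mp hx))), fun a ha => ?_⟩
      by_contra hne
      exact hmem a ((hA2mem a).mpr (Or.inl ⟨ha, hne⟩))
  by_cases hc : ((edits.flatMap (fun e => fieldLabels e)).isEmpty
      && named_attacks.all (fun a => a == "none")) = true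
  · -- fallback: A's set is empty, both sides are [0]
    rw [if_pos hc, hcond.mp hc]
    decide
  · rw [if_neg hc]
    have hA2ne : A2 ≠ [] := fun h => hc (hcond.mpr h)
    rw [if_neg (by simpa [List.isEmpty_iff] using hA2ne)]
    obtain ⟨hpair, hmem⟩ := enumFilterMap
      (fun lbl => (lbl != "none" && named_attacks.contains lbl)
        || (edits.flatMap (fun e => fieldLabels e)).contains lbl)
    apply PySem.List.sorted_eq_of_perm_of_pairwise_lt
    · rw [List.perm_ext_iff_of_nodup (hpair.imp ne_of_lt)
        (((hA2nodup.filter _).map_on (fun a ha b hb heq => albIdx_inj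
          (by simpa using (List.mem_filter.mp ha).2) (by simpa using (List.mem_filter.mp hb).2)
          (by exact_mod_cast heq))))]
      intro i
      rw [hmem i]
      simp only [List.mem_map, List.mem_filter, List.contains_iff_mem, Bool.or_eq_true,
        Bool.and_eq_true, bne_iff_ne, ne_eq]
      constructor
      · rintro ⟨k, hk, rfl, hP⟩
        have hkmem : ATK_LABELS[k] ∈ ATK_LABELS := List.getElem_mem hk
        refine ⟨ATK_LABELS[k], ⟨(hA2mem _).mpr ?_, by simp⟩, ?_⟩
        · rcases hP with ⟨hne, hn⟩ | hel
          · exact Or.inl ⟨hn, hne⟩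
          · exact Or.inr ((hEL _).mp hel)
        · have hgd : ATK_LABELS[k] = ATK_LABELS.getD k "" := by
            simp [List.getD_eq_getElem?_getD, hk]
          have := albIdx_of_getElem k (by simpa [ATK_LABELS] using hk)
          rw [← hgd] at this
          simp only [albIdx] at this
          rw [PySem.List.index?_eq_idxOf?] at this
          simp [this]
      · rintro ⟨a, ⟨haA2, haL⟩, rfl⟩
        have haLm : a ∈ ATK_LABELS := by simpa using haL
        have hlt6 : albIdx a < 6 := albIdx_lt haLm
        refine ⟨albIdx a, by simpa [ATK_LABELS] using hlt6, by simp [albIdx], ?_⟩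
        rw [albIdx_getElem a haLm (by simpa [ATK_LABELS] using hlt6)]
        rcases (hA2mem a).mp haA2 with ⟨hn, hne⟩ | ⟨e, he, hb⟩
        · exact Or.inl ⟨hne, hn⟩
        · exact Or.inr ((hEL a).mpr ⟨e, he, hb⟩)
    · exact hpair

-- ===== VERDICT (by name: the statement is the Claim_ definition above) =====
theorem infer_attack_labels_spec : Claim_equal_infer_attack_labels := by
  intro edits named_attacks _
  unfold Spec_infer_attack_labels
  exact main_eq edits named_attacks
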